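-- pv_equiv track=rewrite | github.com/lakshmi-kamath/ChessAI | backend/feedback.py | _analyze_game_phases
-- ===== SOURCE A (Python) =====
-- from typing import List, Dict, Any, Optional, Tuple
--
-- def _analyze_game_phases(move_history: List[Dict[str, Any]]) -> Dict[str, Any]:
--     """
--     Analyze performance across different game phases.
--
--     Args:
--         move_history: List of moves with their analysis
--
--     Returns:
--         Dictionary with phase analysis
--     """
--     # Simple heuristic for phases
--     opening_moves = min(15, len(move_history) // 3)
--     endgame_index = max(0, len(move_history) - max(10, len(move_history) // 3))
--
--     # Count move quality for different phases
--     phases = {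
--         "opening": {"moves": 0, "blunders": 0, "mistakes": 0, "inaccuracies": 0, "good": 0, "excellent": 0},
--         "middlegame": {"moves": 0, "blunders": 0, "mistakes": 0, "inaccuracies": 0, "good": 0, "excellent": 0},
--         "endgame": {"moves": 0, "blunders": 0, "mistakes": 0, "inaccuracies": 0, "good": 0, "excellent": 0}
--     }
--
--     for i, move in enumerate(move_history):
--         if i < opening_moves:
--             phase = "opening"
--         elif i >= endgame_index:
--             phase = "endgame"
--         else:
--             phase = "middlegame"
--
--         if "analysis" in move and "classification" in move["analysis"]:
--             phases[phase]["moves"] += 1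
--             classification = move["analysis"]["classification"].lower()
--
--             if "blunder" in classification:
--                 phases[phase]["blunders"] += 1
--             elif "mistake" in classification:
--                 phases[phase]["mistakes"] += 1
--             elif "inaccuracy" in classification:
--                 phases[phase]["inaccuracies"] += 1
--             elif "good" in classification:
--                 phases[phase]["good"] += 1
--             elif "excellent" in classification:
--                 phases[phase]["excellent"] += 1
--
--     return phases
-- ===== SOURCE B (Python) =====
-- from typing import List, Dict, Any
--
-- def _analyze_game_phases(move_history: List[Dict[str, Any]]) -> Dict[str, Any]:
--     n = len(move_history)
--     opening_moves = min(15, n // 3)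
--     endgame_index = max(0, n - max(10, n // 3))
--
--     def phase_counts(moves):
--         m = bl = mi = ina = g = e = 0
--         for move in moves:
--             if "analysis" in move and "classification" in move["analysis"]:
--                 m += 1
--                 c = move["analysis"]["classification"].lower()
--                 if "blunder" in c:
--                     bl += 1
--                 elif "mistake" in c:
--                     mi += 1
--                 elif "inaccuracy" in c:
--                     ina += 1
--                 elif "good" in c:
--                     g += 1
--                 elif "excellent" in c:
--                     e += 1
--         return {"moves": m, "blunders": bl, "mistakes": mi,
--                 "inaccuracies": ina, "good": g, "excellent": e}
--
--     split = max(opening_moves, endgame_index)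
--     return {
--         "opening": phase_counts(move_history[:opening_moves]),
--         "middlegame": phase_counts(move_history[opening_moves:endgame_index]),
--         "endgame": phase_counts(move_history[split:]),
--     }
-- ===== Notes on version B (the rewrite author's own statement) =====
-- stated objective: alternative
-- what changed: Instead of one pass with per-index phase branching into a mutated nested dict, B slices the history into the three phase ranges (endgame starting at max(opening_moves, endgame_index)) and counts each slice with a helper using plain integer accumulators, assembling the result dict at the end.
import Mathlib
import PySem

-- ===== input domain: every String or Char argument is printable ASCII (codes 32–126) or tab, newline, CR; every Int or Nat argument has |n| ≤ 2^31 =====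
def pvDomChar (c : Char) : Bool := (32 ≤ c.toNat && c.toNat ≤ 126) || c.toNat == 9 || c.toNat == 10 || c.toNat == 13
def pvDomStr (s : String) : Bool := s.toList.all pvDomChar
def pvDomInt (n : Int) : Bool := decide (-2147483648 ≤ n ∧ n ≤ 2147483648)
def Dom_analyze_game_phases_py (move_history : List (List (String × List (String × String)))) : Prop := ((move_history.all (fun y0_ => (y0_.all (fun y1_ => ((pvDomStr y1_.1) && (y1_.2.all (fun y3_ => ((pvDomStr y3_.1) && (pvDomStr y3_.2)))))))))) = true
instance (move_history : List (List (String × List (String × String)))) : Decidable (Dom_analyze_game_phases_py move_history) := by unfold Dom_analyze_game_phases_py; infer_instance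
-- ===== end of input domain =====

-- B replaces A's single indexed pass over a mutated nested dict by three slice passes with integer accumulators (alternative decomposition, same cost).


-- ===== PORT A =====
-- the fresh per-phase counter dict A builds literally
def pvInitA : PySem.Dict String Int :=
  PySem.Dict.ofList [("moves",0),("blunders",0),("mistakes",0),("inaccuracies",0),("good",0),("excellent",0)]

-- phases[phase][key] += 1
def pvBumpA (phases : PySem.Dict String (PySem.Dict String Int)) (phase key : String) :
    PySem.Dict String (PySem.Dict String Int) :=
  PySem.Dict.modify phases phase PySem.Dict.empty (fun d => PySem.Dict.modify d key 0 (· + 1))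

-- A's loop body on one (index, move) pair
def pvStepA (op eg : Int) (phases : PySem.Dict String (PySem.Dict String Int))
    (p : Int × List (String × List (String × String))) : PySem.Dict String (PySem.Dict String Int) :=
  let phase := if p.1 < op then "opening" else if eg ≤ p.1 then "endgame" else "middlegame"
  match List.lookup "analysis" p.2 with
  | none => phases
  | some analysis =>
    match List.lookup "classification" analysis with
    | none => phases
    | some cls =>
      let phases := pvBumpA phases phase "moves"
      let c := PySem.Str.lower cls
      if PySem.Str.isIn "blunder" c then pvBumpA phases phase "blunders"
      else if PySem.Str.isIn "mistake" c then pvBumpA phases phase "mistakes"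
      else if PySem.Str.isIn "inaccuracy" c then pvBumpA phases phase "inaccuracies"
      else if PySem.Str.isIn "good" c then pvBumpA phases phase "good"
      else if PySem.Str.isIn "excellent" c then pvBumpA phases phase "excellent"
      else phases

def analyze_game_phases_py (move_history : List (List (String × List (String × String)))) :
    List (String × List (String × Int)) :=
  let n := PySem.List.len move_history
  let op := min 15 (PySem.Int.floordiv n 3)
  let eg := max 0 (n - max 10 (PySem.Int.floordiv n 3))
  let phases0 : PySem.Dict String (PySem.Dict String Int) :=
    PySem.Dict.ofList [("opening", pvInitA), ("middlegame", pvInitA), ("endgame", pvInitA)]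
  (((PySem.List.enumerate move_history 0).foldl (pvStepA op eg) phases0).items).map
    (fun kv => (kv.1, kv.2.items))

-- ===== PORT B =====
-- B's inner loop: six integer accumulators over one phase's moves
def pvCount6 (acc : Int × Int × Int × Int × Int × Int)
    (move : List (String × List (String × String))) : Int × Int × Int × Int × Int × Int :=
  match List.lookup "analysis" move with
  | none => acc
  | some analysis =>
    match List.lookup "classification" analysis with
    | none => acc
    | some cls =>
      match acc with
      | (m, bl, mi, ina, g, e) =>
        let c := PySem.Str.lower cls
        if PySem.Str.isIn "blunder" c then (m+1, bl+1, mi, ina, g, e)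
        else if PySem.Str.isIn "mistake" c then (m+1, bl, mi+1, ina, g, e)
        else if PySem.Str.isIn "inaccuracy" c then (m+1, bl, mi, ina+1, g, e)
        else if PySem.Str.isIn "good" c then (m+1, bl, mi, ina, g+1, e)
        else if PySem.Str.isIn "excellent" c then (m+1, bl, mi, ina, g, e+1)
        else (m+1, bl, mi, ina, g, e)

def pvPhaseCounts (moves : List (List (String × List (String × String)))) : List (String × Int) :=
  match moves.foldl pvCount6 (0,0,0,0,0,0) with
  | (m, bl, mi, ina, g, e) =>
    [("moves",m),("blunders",bl),("mistakes",mi),("inaccuracies",ina),("good",g),("excellent",e)]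

def analyze_game_phases_py_alt (move_history : List (List (String × List (String × String)))) :
    List (String × List (String × Int)) :=
  let n := PySem.List.len move_history
  let op := min 15 (PySem.Int.floordiv n 3)
  let eg := max 0 (n - max 10 (PySem.Int.floordiv n 3))
  let split := max op eg
  [("opening", pvPhaseCounts (PySem.List.slice move_history none (some op))),
   ("middlegame", pvPhaseCounts (PySem.List.slice move_history (some op) (some eg))),
   ("endgame", pvPhaseCounts (PySem.List.slice move_history (some split) none))]

-- ===== PRECONDITION & SPEC =====
def Spec_analyze_game_phases_py (move_history : List (List (String × List (String × String)))) (out : List (String × List (String × Int))) : Prop := out = analyze_game_phases_py_alt move_history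
instance (move_history : List (List (String × List (String × String)))) (out : List (String × List (String × Int))) : Decidable (Spec_analyze_game_phases_py move_history out) := by unfold Spec_analyze_game_phases_py; infer_instance

-- ===== CLAIM (what is proved, stated in full; the proofs are below) =====
def Claim_equal_analyze_game_phases_py : Prop := ∀ (move_history : List (List (String × List (String × String)))), Dom_analyze_game_phases_py move_history → Spec_analyze_game_phases_py move_history (analyze_game_phases_py move_history)

-- ===== LEMMAS AND PROOFS =====

-- what one move does to a single phase's counter dict (A's inner branch, phase fixed)
def pvUpd (move : List (String × List (String × String))) (d : PySem.Dict String Int) :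
    PySem.Dict String Int :=
  match List.lookup "analysis" move with
  | none => d
  | some analysis =>
    match List.lookup "classification" analysis with
    | none => d
    | some cls =>
      let d := PySem.Dict.modify d "moves" 0 (· + 1)
      let c := PySem.Str.lower cls
      if PySem.Str.isIn "blunder" c then PySem.Dict.modify d "blunders" 0 (· + 1)
      else if PySem.Str.isIn "mistake" c then PySem.Dict.modify d "mistakes" 0 (· + 1)
      else if PySem.Str.isIn "inaccuracy" c then PySem.Dict.modify d "inaccuracies" 0 (· + 1)
      else if PySem.Str.isIn "good" c then PySem.Dict.modify d "good" 0 (· + 1)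
      else if PySem.Str.isIn "excellent" c then PySem.Dict.modify d "excellent" 0 (· + 1)
      else d

theorem pvBump_open (d1 d2 d3 : PySem.Dict String Int) (k : String) :
    pvBumpA (PySem.Dict.mk [("opening",d1),("middlegame",d2),("endgame",d3)]) "opening" k =
      PySem.Dict.mk [("opening", PySem.Dict.modify d1 k 0 (· + 1)),("middlegame",d2),("endgame",d3)] := by
  simp [pvBumpA, PySem.Dict.modify, PySem.Dict.insert, PySem.Dict.getD, PySem.Dict.get?, PySem.Dict.empty]

theorem pvBump_mid (d1 d2 d3 : PySem.Dict String Int) (k : String) :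
    pvBumpA (PySem.Dict.mk [("opening",d1),("middlegame",d2),("endgame",d3)]) "middlegame" k =
      PySem.Dict.mk [("opening", d1),("middlegame", PySem.Dict.modify d2 k 0 (· + 1)),("endgame",d3)] := by
  simp [pvBumpA, PySem.Dict.modify, PySem.Dict.insert, PySem.Dict.getD, PySem.Dict.get?, PySem.Dict.empty]

theorem pvBump_end (d1 d2 d3 : PySem.Dict String Int) (k : String) :
    pvBumpA (PySem.Dict.mk [("opening",d1),("middlegame",d2),("endgame",d3)]) "endgame" k =
      PySem.Dict.mk [("opening", d1),("middlegame", d2),("endgame", PySem.Dict.modify d3 k 0 (· + 1))] := by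
  simp [pvBumpA, PySem.Dict.modify, PySem.Dict.insert, PySem.Dict.getD, PySem.Dict.get?, PySem.Dict.empty]

theorem pvStepA_open (op eg i : Int) (move : List (String × List (String × String)))
    (d1 d2 d3 : PySem.Dict String Int) (h : i < op) :
    pvStepA op eg (PySem.Dict.mk [("opening",d1),("middlegame",d2),("endgame",d3)]) (i, move) =
      PySem.Dict.mk [("opening", pvUpd move d1),("middlegame",d2),("endgame",d3)] := by
  unfold pvStepA pvUpd
  simp only [if_pos h]
  cases hA : List.lookup "analysis" move with
  | none => rfl
  | some a =>
    cases hC : List.lookup "classification" a with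
    | none => simp only [hC]
    | some cls => simp only [hC]; split_ifs <;> simp [pvBump_open]

theorem pvStepA_mid (op eg i : Int) (move : List (String × List (String × String)))
    (d1 d2 d3 : PySem.Dict String Int) (h1 : ¬ i < op) (h2 : ¬ eg ≤ i) :
    pvStepA op eg (PySem.Dict.mk [("opening",d1),("middlegame",d2),("endgame",d3)]) (i, move) =
      PySem.Dict.mk [("opening",d1),("middlegame", pvUpd move d2),("endgame",d3)] := by
  unfold pvStepA pvUpd
  simp only [if_neg h1, if_neg h2]
  cases hA : List.lookup "analysis" move with
  | none => rfl
  | some a =>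
    cases hC : List.lookup "classification" a with
    | none => simp only [hC]
    | some cls => simp only [hC]; split_ifs <;> simp [pvBump_mid]

theorem pvStepA_end (op eg i : Int) (move : List (String × List (String × String)))
    (d1 d2 d3 : PySem.Dict String Int) (h1 : ¬ i < op) (h2 : eg ≤ i) :
    pvStepA op eg (PySem.Dict.mk [("opening",d1),("middlegame",d2),("endgame",d3)]) (i, move) =
      PySem.Dict.mk [("opening",d1),("middlegame",d2),("endgame", pvUpd move d3)] := by
  unfold pvStepA pvUpd
  simp only [if_neg h1, if_pos h2]
  cases hA : List.lookup "analysis" move with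
  | none => rfl
  | some a =>
    cases hC : List.lookup "classification" a with
    | none => simp only [hC]
    | some cls => simp only [hC]; split_ifs <;> simp [pvBump_end]

theorem pvFold_open (op eg : Int) (l : List (List (String × List (String × String)))) (s : Int)
    (d1 d2 d3 : PySem.Dict String Int) (h : ∀ k : Nat, k < l.length → s + k < op) :
    (PySem.List.enumerate l s).foldl (pvStepA op eg) (PySem.Dict.mk [("opening",d1),("middlegame",d2),("endgame",d3)]) =
      PySem.Dict.mk [("opening", l.foldl (fun d mv => pvUpd mv d) d1),("middlegame",d2),("endgame",d3)] := by
  induction l generalizing s d1 with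
  | nil => simp [PySem.List.enumerate]
  | cons x xs ih =>
    rw [PySem.List.enumerate_cons]
    simp only [List.foldl_cons]
    rw [pvStepA_open op eg s x d1 d2 d3 (by simpa using h 0 (by simp))]
    exact ih (s + 1) _ (fun k hk => by
      have := h (k + 1) (by simpa using Nat.succ_lt_succ hk)
      push_cast at this ⊢; omega)

theorem pvFold_mid (op eg : Int) (l : List (List (String × List (String × String)))) (s : Int)
    (d1 d2 d3 : PySem.Dict String Int) (h : ∀ k : Nat, k < l.length → op ≤ s + k ∧ s + k < eg) :
    (PySem.List.enumerate l s).foldl (pvStepA op eg) (PySem.Dict.mk [("opening",d1),("middlegame",d2),("endgame",d3)]) =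
      PySem.Dict.mk [("opening",d1),("middlegame", l.foldl (fun d mv => pvUpd mv d) d2),("endgame",d3)] := by
  induction l generalizing s d2 with
  | nil => simp [PySem.List.enumerate]
  | cons x xs ih =>
    rw [PySem.List.enumerate_cons]
    simp only [List.foldl_cons]
    have h0 := h 0 (by simp)
    rw [pvStepA_mid op eg s x d1 d2 d3 (by simp at h0; omega) (by simp at h0; omega)]
    exact ih (s + 1) _ (fun k hk => by
      have := h (k + 1) (by simpa using Nat.succ_lt_succ hk)
      push_cast at this ⊢; omega)

theorem pvFold_end (op eg : Int) (l : List (List (String × List (String × String)))) (s : Int)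
    (d1 d2 d3 : PySem.Dict String Int) (h : ∀ k : Nat, k < l.length → op ≤ s + k ∧ eg ≤ s + k) :
    (PySem.List.enumerate l s).foldl (pvStepA op eg) (PySem.Dict.mk [("opening",d1),("middlegame",d2),("endgame",d3)]) =
      PySem.Dict.mk [("opening",d1),("middlegame",d2),("endgame", l.foldl (fun d mv => pvUpd mv d) d3)] := by
  induction l generalizing s d3 with
  | nil => simp [PySem.List.enumerate]
  | cons x xs ih =>
    rw [PySem.List.enumerate_cons]
    simp only [List.foldl_cons]
    have h0 := h 0 (by simp)
    rw [pvStepA_end op eg s x d1 d2 d3 (by simp at h0; omega) (by simp at h0; omega)]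
    exact ih (s + 1) _ (fun k hk => by
      have := h (k + 1) (by simpa using Nat.succ_lt_succ hk)
      push_cast at this ⊢; omega)

-- one move on the six-key counter dict versus B's tuple step
theorem pvUpd_items (mv : List (String × List (String × String))) (m bl mi ina g e : Int) :
    pvUpd mv (PySem.Dict.mk [("moves",m),("blunders",bl),("mistakes",mi),("inaccuracies",ina),("good",g),("excellent",e)]) =
      (match pvCount6 (m,bl,mi,ina,g,e) mv with
       | (m', bl', mi', ina', g', e') =>
         PySem.Dict.mk [("moves",m'),("blunders",bl'),("mistakes",mi'),("inaccuracies",ina'),("good",g'),("excellent",e')]) := by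
  unfold pvUpd pvCount6
  cases hA : List.lookup "analysis" mv with
  | none => rfl
  | some a =>
    cases hC : List.lookup "classification" a with
    | none => simp only [hC]
    | some cls =>
      simp only [hC]
      split_ifs <;>
        simp [PySem.Dict.modify, PySem.Dict.insert, PySem.Dict.getD, PySem.Dict.get?]

-- the counter-dict fold agrees with B's six-accumulator fold
theorem pvCounters (l : List (List (String × List (String × String))))
    (m bl mi ina g e : Int) :
    (l.foldl (fun d mv => pvUpd mv d) (PySem.Dict.mk [("moves",m),("blunders",bl),("mistakes",mi),("inaccuracies",ina),("good",g),("excellent",e)])).items =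
      (match l.foldl pvCount6 (m,bl,mi,ina,g,e) with
       | (m', bl', mi', ina', g', e') =>
         [("moves",m'),("blunders",bl'),("mistakes",mi'),("inaccuracies",ina'),("good",g'),("excellent",e')]) := by
  induction l generalizing m bl mi ina g e with
  | nil => rfl
  | cons x xs ih =>
    simp only [List.foldl_cons, pvUpd_items]
    cases hx : pvCount6 (m,bl,mi,ina,g,e) x with
    | mk m' r =>
      obtain ⟨bl', mi', ina', g', e'⟩ := r
      exact ih m' bl' mi' ina' g' e'

-- ===== VERDICT (by name: the statement is the Claim_ definition above) =====
theorem analyze_game_phases_py_spec : Claim_equal_analyze_game_phases_py := by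
  unfold Claim_equal_analyze_game_phases_py Spec_analyze_game_phases_py
  intro mh _
  unfold analyze_game_phases_py analyze_game_phases_py_alt
  simp only [PySem.List.len_eq]
  have h3 : PySem.Int.floordiv (mh.length : Int) 3 = ((mh.length / 3 : Nat) : Int) := by
    exact_mod_cast PySem.Int.floordiv_natCast mh.length 3
  rw [h3]
  set n := mh.length with hn
  set a : Nat := min 15 (n / 3) with ha
  set e : Nat := n - max 10 (n / 3) with he
  have hop : min (15 : Int) ((n / 3 : Nat) : Int) = (a : Int) := by omega
  have heg : max (0 : Int) ((n : Int) - max 10 ((n / 3 : Nat) : Int)) = (e : Int) := by omega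
  have hmx : max ((a : Nat) : Int) ((e : Nat) : Int) = ((max a e : Nat) : Int) := by omega
  rw [hop, heg, hmx]
  rw [PySem.List.slice_to_natCast, PySem.List.slice_natCast, PySem.List.slice_from_natCast]
  have hsplit : mh = mh.take a ++ ((mh.drop a).take (e - a) ++ mh.drop (max a e)) := by
    have h1 : mh.take a ++ (mh.drop a).take (e - a) = mh.take (max a e) := by
      rcases Nat.le_total a e with hle | hle
      · rw [← List.take_add]
        congr 1
        omega
      · have : e - a = 0 := by omega
        rw [this]
        simp
        omega
    calc mh = mh.take (max a e) ++ mh.drop (max a e) := (List.take_append_drop _ _).symm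
      _ = mh.take a ++ ((mh.drop a).take (e - a) ++ mh.drop (max a e)) := by
            rw [← h1, List.append_assoc]
  have hphases0 : PySem.Dict.ofList [("opening", pvInitA), ("middlegame", pvInitA), ("endgame", pvInitA)] =
      PySem.Dict.mk [("opening", pvInitA), ("middlegame", pvInitA), ("endgame", pvInitA)] := by rfl
  conv_lhs => rw [hsplit]
  rw [hphases0, PySem.List.enumerate_append, List.foldl_append,
      PySem.List.enumerate_append, List.foldl_append]
  have hlt : (mh.take a).length = min a n := by simp [List.length_take]; omega
  have hld : ((mh.drop a).take (e - a)).length = min (e - a) (n - a) := by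
    simp [List.length_take, List.length_drop]; omega
  rw [pvFold_open _ _ _ 0 _ _ _ (fun k hk => by rw [hlt] at hk; push_cast; omega)]
  rw [pvFold_mid _ _ _ _ _ _ _ (fun k hk => by
        rw [hld] at hk
        rw [hlt]
        constructor <;> (push_cast; omega))]
  rw [pvFold_end _ _ _ _ _ _ _ (fun k hk => by
        simp only [List.length_drop] at hk
        rw [hlt, hld]
        constructor <;> (push_cast; omega))]
  have hpc : ∀ l : List (List (String × List (String × String))),
      pvPhaseCounts l = (l.foldl (fun d mv => pvUpd mv d) pvInitA).items := by
    intro l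
    rw [pvPhaseCounts, show pvInitA = PySem.Dict.mk [("moves",0),("blunders",0),("mistakes",0),("inaccuracies",0),("good",0),("excellent",0)] from rfl,
        pvCounters]
  simp only [hpc]
  rfl
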